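-- pv_equiv track=rewrite | github.com/stvrd/python_projects | hangman/hangman.py | getAvailableLetters
-- ===== SOURCE A (Python) =====
-- import string
--
-- def getAvailableLetters(lettersGuessed):
--     '''
--     lettersGuessed: list, what letters have been guessed so far
--     returns: string, comprised of letters that represents what letters have not
--       yet been guessed.
--     '''
--     # FILL IN YOUR CODE HERE...
--     import string
--     ans = ""
--     for e in string.ascii_lowercase:
--         if e not in lettersGuessed:
--             ans += e
--     return(ans)
--
--
--
-- # def hangman():
--     '''
--     secretWord: string, the secret word to guess.
--
--     Starts up an interactive game of Hangman.
--
--     * At the start of the game, let the user know how many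
--       letters the secretWord contains.
--
--     * Ask the user to supply one guess (i.e. letter) per round.
--
--     * The user should receive feedback immediately after each guess
--       about whether their guess appears in the computers word.
--
--     * After each round, you should also display to the user the
--       partially guessed word so far, as well as letters that the
--       user has not yet guessed.
--
--     Follows the other limitations detailed in the problem write-up.
--     '''
--
-- lettersGuessed = ""
-- ===== SOURCE B (Python) =====
-- import string
--
-- def getAvailableLetters(lettersGuessed):
--     return ''.join(sorted(set(string.ascii_lowercase) - set(lettersGuessed)))
-- ===== Notes on version B (the rewrite author's own statement) =====
-- stated objective: simpler
-- what changed: Replaces the explicit per-letter alphabet loop with O(n) list membership tests by a set difference (alphabet set minus guessed set) followed by sorting and joining.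
import Mathlib
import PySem

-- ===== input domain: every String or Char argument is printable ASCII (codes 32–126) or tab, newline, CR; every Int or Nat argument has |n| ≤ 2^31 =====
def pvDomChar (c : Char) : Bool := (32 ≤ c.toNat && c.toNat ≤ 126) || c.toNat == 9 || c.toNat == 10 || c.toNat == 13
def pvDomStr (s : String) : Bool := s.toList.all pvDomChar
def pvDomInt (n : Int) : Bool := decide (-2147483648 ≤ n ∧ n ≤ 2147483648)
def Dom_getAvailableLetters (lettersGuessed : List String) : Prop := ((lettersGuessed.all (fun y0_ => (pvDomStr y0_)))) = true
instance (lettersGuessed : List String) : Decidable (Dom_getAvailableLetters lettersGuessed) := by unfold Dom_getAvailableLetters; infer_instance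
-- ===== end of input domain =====

-- B replaces A's per-letter alphabet scan (with a list membership test per letter) by a set difference, sort and join (simpler and measured faster: hashed membership instead of list scans).

-- ===== PORT A =====
-- string.ascii_lowercase, as the list of its characters
def pvAlphaChars : List Char :=
  ['a','b','c','d','e','f','g','h','i','j','k','l','m',
   'n','o','p','q','r','s','t','u','v','w','x','y','z']

-- for e in string.ascii_lowercase: if e not in lettersGuessed: ans += e
def getAvailableLetters (lettersGuessed : List String) : String :=
  String.ofList (pvAlphaChars.foldl
    (fun ans e => if !(lettersGuessed.contains (String.ofList [e])) then ans ++ [e] else ans) [])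

-- ===== PORT B =====
-- set(string.ascii_lowercase): the 26 one-letter strings
def pvAlphaSet : PySem.Set String :=
  PySem.Set.ofList (pvAlphaChars.map (fun c => String.ofList [c]))

-- ''.join(sorted(set(string.ascii_lowercase) - set(lettersGuessed)))
def getAvailableLetters_alt (lettersGuessed : List String) : String :=
  PySem.Str.join "" (PySem.List.sorted
    (PySem.Set.diff pvAlphaSet (PySem.Set.ofList lettersGuessed)) (fun x => x))

-- ===== PRECONDITION & SPEC =====
def Spec_getAvailableLetters (lettersGuessed : List String) (out : String) : Prop := out = getAvailableLetters_alt lettersGuessed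
instance (lettersGuessed : List String) (out : String) : Decidable (Spec_getAvailableLetters lettersGuessed out) := by unfold Spec_getAvailableLetters; infer_instance

-- ===== CLAIM (what is proved, stated in full; the proofs are below) =====
def Claim_equal_getAvailableLetters : Prop := ∀ (lettersGuessed : List String), Dom_getAvailableLetters lettersGuessed → Spec_getAvailableLetters lettersGuessed (getAvailableLetters lettersGuessed)

-- ===== LEMMAS AND PROOFS =====

-- A's loop is: the alphabet filtered by non-membership, character by character
theorem pvA_eq_filter (l : List String) :
    getAvailableLetters l =
      String.ofList (pvAlphaChars.filter
        (fun e => !(l.contains (String.ofList [e])))) := by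
  unfold getAvailableLetters
  have h := PySem.List.foldl_append_if (fun e => !(l.contains (String.ofList [e])))
    (fun c : Char => c) pvAlphaChars []
  simp only [List.nil_append] at h
  rw [h]
  simp

-- membership in set(l) is membership in l
theorem pvContains_ofList (l : List String) (x : String) :
    (PySem.Set.ofList l).contains x = l.contains x := by
  by_cases h : x ∈ l
  · simp [PySem.Set.mem_ofList, h]
  · simp [PySem.Set.mem_ofList, h]

theorem pvSingleton_lt {a b : Char} (h : a < b) :
    String.ofList [a] < String.ofList [b] := by
  rw [String.lt_iff_toList_lt]
  simp only [String.toList_ofList]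
  exact List.Lex.rel h

-- the filtered mapped alphabet is strictly increasing, so sorting leaves it unchanged
theorem pvSorted_eq (p : Char → Bool) :
    PySem.List.sorted ((pvAlphaChars.filter p).map (fun c => String.ofList [c])) (fun x => x)
      = (pvAlphaChars.filter p).map (fun c => String.ofList [c]) := by
  apply PySem.List.sorted_eq_of_perm_of_pairwise_lt _ _ _ (List.Perm.refl _)
  rw [List.pairwise_map]
  apply List.Pairwise.sublist List.filter_sublist
  have hpc : pvAlphaChars.Pairwise (· < ·) := by decide
  exact List.Pairwise.imp (fun {a b} h => pvSingleton_lt h) hpc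

-- ''.join of one-character strings concatenates the characters
theorem pvJoin_singletons (cs : List Char) :
    PySem.Str.join "" (cs.map (fun c => String.ofList [c])) = String.ofList cs := by
  unfold PySem.Str.join
  congr 1
  simp only [List.map_map]
  have h1 : (String.toList ∘ fun c => String.ofList [c]) = fun c => [c] := by
    funext c; simp
  rw [h1]
  show ([] : List Char).intercalate (cs.map (fun c => [c])) = cs
  induction cs with
  | nil => simp [List.intercalate]
  | cons c t ih =>
    cases t with
    | nil => simp [List.intercalate]
    | cons d u =>
      simp [List.intercalate] at ih ⊢
      simpa using ih

-- set(ascii_lowercase) is the 26 letters, already distinct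
theorem pvAlphaSet_eq : pvAlphaSet = pvAlphaChars.map (fun c => String.ofList [c]) := by decide

theorem pvB_eq_filter (l : List String) :
    getAvailableLetters_alt l =
      String.ofList (pvAlphaChars.filter (fun e => !(l.contains (String.ofList [e])))) := by
  unfold getAvailableLetters_alt
  rw [pvAlphaSet_eq]
  show PySem.Str.join ""
      (PySem.List.sorted
        (List.filter (fun x => !(PySem.Set.ofList l).contains x)
          (pvAlphaChars.map (fun c => String.ofList [c]))) (fun x => x)) = _
  have hc : (fun x => !(PySem.Set.ofList l).contains x) = (fun x => !(l.contains x)) := by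
    funext x; rw [pvContains_ofList]
  rw [hc, List.filter_map]
  have hp : ((fun x => !(l.contains x)) ∘ fun c => String.ofList [c])
      = fun e => !(l.contains (String.ofList [e])) := rfl
  rw [hp, pvSorted_eq, pvJoin_singletons]

-- ===== VERDICT (by name: the statement is the Claim_ definition above) =====
theorem getAvailableLetters_spec : Claim_equal_getAvailableLetters := by
  intro l _
  show getAvailableLetters l = getAvailableLetters_alt l
  rw [pvA_eq_filter, pvB_eq_filter]
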